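-- pv_equiv track=rewrite | github.com/SohaibAamir28/M-IT-2-2025-Winter-Contest | Round1/7.py | bugged_sort
-- ===== SOURCE A (Python) =====
-- def bugged_sort(t, test_cases):
--     from collections import defaultdict, deque
--
--     results = []
--
--     for n, a, b in test_cases:
--         # Create adjacency list for swaps
--         adjacency = defaultdict(list)
--         for i in range(n):
--             adjacency[a[i]].append(b[i])
--             adjacency[b[i]].append(a[i])
--
--         # Visited set to mark elements we've processed
--         visited = set()
--
--         def bfs(start):
--             queue = deque([start])
--             component = []
--             while queue:
--                 current = queue.popleft()
--                 if current not in visited: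
--                     visited.add(current)
--                     component.append(current)
--                     queue.extend(neighbor for neighbor in adjacency[current] if neighbor not in visited)
--             return component
--
--         # Check all connected components
--         possible = True
--         for x in range(1, 2 * n + 1):
--             if x not in visited:
--                 component = bfs(x)
--                 if not is_sortable(component, n):
--                     possible = False
--                     break
--
--         results.append("YES" if possible else "NO")
--
--     return results
--
-- def is_sortable(component, n):
--     """ Check if the component can be split into two sorted parts. """
--     component.sort()
--     # Check if we can split into two halves that can be sorted separately
--     return all(1 <= x <= 2 * n for x in component)
-- ===== SOURCE B (Python) =====
-- def bugged_sort(t, test_cases):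
--     # Edge-list saturation instead of BFS: grow the set of values reachable
--     # from in-range [1, 2n] endpoints; answer NO iff it ever captures an
--     # out-of-range value.
--     results = []
--     for n, a, b in test_cases:
--         edges = [(a[i], b[i]) for i in range(n)]
--         reach = set()
--         for u, v in edges:
--             if 1 <= u <= 2 * n:
--                 reach.add(u)
--             if 1 <= v <= 2 * n:
--                 reach.add(v)
--         for _ in range(2 * len(edges)):
--             before = len(reach)
--             for u, v in edges:
--                 if u in reach or v in reach:
--                     reach.add(u)
--                     reach.add(v)
--             if len(reach) == before:
--                 break
--         ok = all(1 <= x <= 2 * n for x in reach)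
--         results.append("YES" if ok else "NO")
--     return results
-- ===== Notes on version B (the rewrite author's own statement) =====
-- stated objective: simpler
-- what changed: Replaces the per-start BFS over a defaultdict adjacency list (with shared visited set and per-component sort+check) by plain edge-list saturation: grow the set of values reachable from in-range endpoints by repeated passes over the edge list until a pass adds nothing, then answer NO iff the set captured an out-of-range value.
import Mathlib
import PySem

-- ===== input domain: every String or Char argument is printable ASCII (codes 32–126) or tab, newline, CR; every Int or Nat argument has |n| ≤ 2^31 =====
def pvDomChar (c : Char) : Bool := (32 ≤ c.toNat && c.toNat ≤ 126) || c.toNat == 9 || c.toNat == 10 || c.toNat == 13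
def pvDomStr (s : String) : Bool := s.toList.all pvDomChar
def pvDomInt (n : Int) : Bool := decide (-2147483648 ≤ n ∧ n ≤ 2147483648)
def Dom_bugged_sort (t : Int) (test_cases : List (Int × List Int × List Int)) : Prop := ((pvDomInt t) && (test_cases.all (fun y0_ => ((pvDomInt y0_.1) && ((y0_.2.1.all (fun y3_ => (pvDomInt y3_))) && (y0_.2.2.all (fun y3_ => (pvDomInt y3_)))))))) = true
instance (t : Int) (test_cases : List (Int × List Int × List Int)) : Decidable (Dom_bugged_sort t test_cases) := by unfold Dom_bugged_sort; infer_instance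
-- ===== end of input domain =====

-- B replaces the per-start BFS over an adjacency dict by edge-list saturation of the
-- set reachable from in-range values (objective: simpler; equivalence of return value).

-- ===== PORT A =====
-- in-range check shared by both ports' transliterations of '1 <= x <= 2*n'
def pvInR (n x : Int) : Bool := decide (1 ≤ x ∧ x ≤ 2 * n)

-- is_sortable(component, n): component.sort(); all(1 <= x <= 2n)
def pvIsSortable (component : List Int) (n : Int) : Bool :=
  (PySem.List.sorted component (fun x => x) false).all (fun x => pvInR n x)

-- adjacency = defaultdict(list); for i in range(n): adjacency[a[i]].append(b[i]); adjacency[b[i]].append(a[i])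
def pvAdj (n : Int) (a b : List Int) : PySem.Dict Int (List Int) :=
  (PySem.List.pyRange 0 n 1).foldl (fun d i =>
    match PySem.List.pyGet? a i, PySem.List.pyGet? b i with
    | some ai, some bi =>
      let d1 := d.insert ai (d.getD ai [] ++ [bi])
      d1.insert bi (d1.getD bi [] ++ [ai])
    | _, _ => d) PySem.Dict.empty   -- 'none' case = IndexError in Python, excluded by Pre_

-- universe list used only as a termination bound for the BFS recursion (all neighbour values)
def pvEnds (n : Int) (a b : List Int) : List Int :=
  (PySem.List.pyRange 0 n 1).foldl (fun l i =>
    match PySem.List.pyGet? a i, PySem.List.pyGet? b i with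
    | some ai, some bi => l ++ [ai, bi]
    | _, _ => l) []

theorem pvCountP_lt {p q : Int → Bool} (l : List Int) (h : ∀ a, p a = true → q a = true)
    (x : Int) (hx : x ∈ l) (hpx : p x = false) (hqx : q x = true) :
    l.countP p < l.countP q := by
  induction l with
  | nil => cases hx
  | cons a l ih =>
    rcases List.mem_cons.mp hx with rfl | hx
    · have hle : l.countP p ≤ l.countP q := List.countP_mono_left (fun a _ hpa => h a hpa)
      simp only [List.countP_cons, hpx, hqx]
      simp; omega
    · have hlt := ih hx
      simp only [List.countP_cons]
      by_cases hpa : p a = true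
      · simp [hpa, h a hpa]; omega
      · simp only [Bool.not_eq_true] at hpa
        simp only [hpa]
        by_cases hqa : q a = true <;> simp [hqa] <;> omega

-- bfs(start): queue-based BFS; the extra list U only bounds the recursion (every
-- enqueued value lies in U on real calls, proved below), and the final 'else'
-- branch is a totality guard never taken there.
def pvBfs (adj : PySem.Dict Int (List Int)) (U : List Int) :
    List Int → PySem.Set Int → List Int × PySem.Set Int
  | [], vis => ([], vis)
  | cur :: queue, vis =>
    if hv : PySem.Set.contains vis cur then pvBfs adj U queue vis
    else if hu : cur ∈ U then
      let vis' : PySem.Set Int := PySem.Set.add vis cur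
      let extra := (adj.getD cur []).filter (fun w => !(PySem.Set.contains vis' w))
      let r := pvBfs adj U (queue ++ extra) vis'
      (cur :: r.1, r.2)
    else pvBfs adj U queue vis
termination_by queue vis => (U.countP (fun v => !(PySem.Set.contains vis v)), queue.length)
decreasing_by
  · exact Prod.Lex.right _ (Nat.lt_succ_self _)
  · apply Prod.Lex.left
    apply pvCountP_lt U _ cur hu
    · simp [PySem.Set.mem_add]
    · simpa using hv
    · intro a ha
      simp only [Bool.not_eq_true'] at ha ⊢
      simp only [PySem.Set.contains_eq_listContains] at *
      simp only [List.contains_eq_mem, decide_eq_false_iff_not] at ha ⊢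
      intro hmem; exact ha (by simp [PySem.Set.mem_add]; left; exact hmem)
  · exact Prod.Lex.right _ (Nat.lt_succ_self _)

-- for x in range(1, 2n+1): if x not in visited: component = bfs(x); if not is_sortable(...): possible = False; break
def pvXLoop (n : Int) (adj : PySem.Dict Int (List Int)) (ends : List Int) :
    List Int → PySem.Set Int → Bool
  | [], _ => true
  | x :: xs, vis =>
    if PySem.Set.contains vis x then pvXLoop n adj ends xs vis
    else
      let r := pvBfs adj (x :: ends) [x] vis
      if pvIsSortable r.1 n then pvXLoop n adj ends xs r.2 else false

def pvCaseA (c : Int × List Int × List Int) : String :=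
  let n := c.1
  let adj := pvAdj n c.2.1 c.2.2
  if pvXLoop n adj (pvEnds n c.2.1 c.2.2) (PySem.List.pyRange 1 (2 * n + 1) 1) PySem.Set.empty
  then "YES" else "NO"

def bugged_sort (t : Int) (test_cases : List (Int × List Int × List Int)) : List String :=
  test_cases.foldl (fun results c => results ++ [pvCaseA c]) []

-- ===== PORT B =====
-- edges = [(a[i], b[i]) for i in range(n)]
def pvEdges (n : Int) (a b : List Int) : List (Int × Int) :=
  (PySem.List.pyRange 0 n 1).foldl (fun es i =>
    match PySem.List.pyGet? a i, PySem.List.pyGet? b i with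
    | some u, some v => es ++ [(u, v)]
    | _, _ => es) []   -- 'none' case = IndexError in Python, excluded by Pre_

-- initial reach: in-range endpoints
def pvInit (n : Int) (edges : List (Int × Int)) : PySem.Set Int :=
  edges.foldl (fun s e =>
    let s1 := if pvInR n e.1 then PySem.Set.add s e.1 else s
    if pvInR n e.2 then PySem.Set.add s1 e.2 else s1) PySem.Set.empty

-- one pass: for (u,v) in edges: if u in reach or v in reach: add both
def pvPass (edges : List (Int × Int)) (s : PySem.Set Int) : PySem.Set Int :=
  edges.foldl (fun s e =>
    if PySem.Set.contains s e.1 || PySem.Set.contains s e.2 then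
      PySem.Set.add (PySem.Set.add s e.1) e.2
    else s) s

-- bounded saturation; stops as soon as a pass adds nothing (len(reach) == before)
def pvSat (edges : List (Int × Int)) : Nat → PySem.Set Int → PySem.Set Int
  | 0, s => s
  | m + 1, s =>
    let s' := pvPass edges s
    if s'.length = s.length then s' else pvSat edges m s'

def pvCaseB (c : Int × List Int × List Int) : String :=
  let n := c.1
  let edges := pvEdges n c.2.1 c.2.2
  let reach := pvSat edges (2 * edges.length) (pvInit n edges)
  if reach.all (fun x => pvInR n x) then "YES" else "NO"

def bugged_sort_alt (t : Int) (test_cases : List (Int × List Int × List Int)) : List String :=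
  test_cases.foldl (fun results c => results ++ [pvCaseB c]) []

-- ===== PRECONDITION & SPEC =====
-- Pre_ excludes exactly the test cases where Python A raises IndexError: a[i]/b[i] for i in range(n) needs n ≤ len(a) and n ≤ len(b).
def Pre_bugged_sort (t : Int) (test_cases : List (Int × List Int × List Int)) : Prop :=
  ∀ c ∈ test_cases, c.1 ≤ (c.2.1.length : Int) ∧ c.1 ≤ (c.2.2.length : Int)
instance (t : Int) (test_cases : List (Int × List Int × List Int)) : Decidable (Pre_bugged_sort t test_cases) := by unfold Pre_bugged_sort; infer_instance

def pvWitness_bugged_sort : Int × (List (Int × List Int × List Int)) :=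
  (1, [(2, [1, 3], [2, 100])])

def Spec_bugged_sort (t : Int) (test_cases : List (Int × List Int × List Int)) (out : List String) : Prop := out = bugged_sort_alt t test_cases
instance (t : Int) (test_cases : List (Int × List Int × List Int)) (out : List String) : Decidable (Spec_bugged_sort t test_cases out) := by unfold Spec_bugged_sort; infer_instance

-- ===== CLAIM (what is proved, stated in full; the proofs are below) =====
def Claim_equal_bugged_sort : Prop := ∀ (t : Int) (test_cases : List (Int × List Int × List Int)), Dom_bugged_sort t test_cases → Pre_bugged_sort t test_cases → Spec_bugged_sort t test_cases (bugged_sort t test_cases)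

-- ===== LEMMAS AND PROOFS =====

-- the undirected swap relation induced by an edge list
def pvAdjRel (E : List (Int × Int)) (u v : Int) : Prop := (u, v) ∈ E ∨ (v, u) ∈ E

def pvReach (E : List (Int × Int)) : Int → Int → Prop := Relation.ReflTransGen (pvAdjRel E)

-- "some in-range value can reach an out-of-range value"
def pvBad (n : Int) (E : List (Int × Int)) : Prop :=
  ∃ x y, pvInR n x = true ∧ pvReach E x y ∧ pvInR n y = false

-- the one-directed step relation stored in the adjacency dict
def pvRA (adj : PySem.Dict Int (List Int)) (u v : Int) : Prop := v ∈ adj.getD u []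

-- -------- adjacency dict ↔ edge list --------

theorem pvAdjStep_inv (d : PySem.Dict Int (List Int)) (es : List (Int × Int)) (u v : Int)
    (hinv : ∀ p q : Int, q ∈ d.getD p [] ↔ (p, q) ∈ es ∨ (q, p) ∈ es) :
    ∀ p q : Int,
      q ∈ ((d.insert u (d.getD u [] ++ [v])).insert v
            ((d.insert u (d.getD u [] ++ [v])).getD v [] ++ [u])).getD p [] ↔
      (p, q) ∈ es ++ [(u, v)] ∨ (q, p) ∈ es ++ [(u, v)] := by
  intro p q
  simp only [PySem.Dict.getD_insert, List.mem_append, List.mem_singleton, Prod.mk.injEq]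
  by_cases hpv : p = v <;> by_cases hpu : p = u <;> by_cases hvu : v = u <;>
    simp_all <;> tauto

theorem pvAdj_fold (a b : List Int) (l : List Int) (d : PySem.Dict Int (List Int))
    (es : List (Int × Int))
    (hinv : ∀ p q : Int, q ∈ d.getD p [] ↔ (p, q) ∈ es ∨ (q, p) ∈ es) :
    ∀ p q : Int,
      q ∈ (l.foldl (fun d i =>
          match PySem.List.pyGet? a i, PySem.List.pyGet? b i with
          | some ai, some bi =>
            let d1 := d.insert ai (d.getD ai [] ++ [bi])
            d1.insert bi (d1.getD bi [] ++ [ai])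
          | _, _ => d) d).getD p [] ↔
      (p, q) ∈ (l.foldl (fun es i =>
          match PySem.List.pyGet? a i, PySem.List.pyGet? b i with
          | some u, some v => es ++ [(u, v)]
          | _, _ => es) es) ∨
      (q, p) ∈ (l.foldl (fun es i =>
          match PySem.List.pyGet? a i, PySem.List.pyGet? b i with
          | some u, some v => es ++ [(u, v)]
          | _, _ => es) es) := by
  induction l generalizing d es with
  | nil => simpa using hinv
  | cons i l ih =>
    simp only [List.foldl_cons]
    cases ha : PySem.List.pyGet? a i <;> cases hb : PySem.List.pyGet? b i
    · exact ih d es hinv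
    · exact ih d es hinv
    · exact ih d es hinv
    · exact ih _ _ (pvAdjStep_inv d es _ _ hinv)

theorem pvAdj_getD (n : Int) (a b : List Int) (v w : Int) :
    w ∈ (pvAdj n a b).getD v [] ↔ pvAdjRel (pvEdges n a b) v w := by
  exact pvAdj_fold a b (PySem.List.pyRange 0 n 1) PySem.Dict.empty []
    (by intro p q; simp [PySem.Dict.getD_empty]) v w

theorem pvEnds_fold (a b : List Int) (l : List Int) (acc : List Int)
    (es : List (Int × Int))
    (hinv : ∀ w : Int, w ∈ acc ↔ ∃ e ∈ es, w = e.1 ∨ w = e.2) :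
    ∀ w : Int,
      w ∈ (l.foldl (fun l i =>
          match PySem.List.pyGet? a i, PySem.List.pyGet? b i with
          | some ai, some bi => l ++ [ai, bi]
          | _, _ => l) acc) ↔
      ∃ e ∈ (l.foldl (fun es i =>
          match PySem.List.pyGet? a i, PySem.List.pyGet? b i with
          | some u, some v => es ++ [(u, v)]
          | _, _ => es) es), w = e.1 ∨ w = e.2 := by
  induction l generalizing acc es with
  | nil => simpa using hinv
  | cons i l ih =>
    simp only [List.foldl_cons]
    rcases ha : PySem.List.pyGet? a i with _ | av <;> rcases hb : PySem.List.pyGet? b i with _ | bv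
    · exact ih acc es hinv
    · exact ih acc es hinv
    · exact ih acc es hinv
    · refine ih _ _ ?_
      intro w
      rw [List.mem_append, hinv w]
      constructor
      · rintro (⟨e, he, hw⟩ | hw)
        · exact ⟨e, by simp [he], hw⟩
        · rcases List.mem_cons.mp hw with rfl | hw
          · exact ⟨(w, bv), by simp, Or.inl rfl⟩
          · rcases List.mem_cons.mp hw with rfl | hw
            · exact ⟨(av, w), by simp, Or.inr rfl⟩
            · cases hw
      · rintro ⟨e, he, hw⟩
        rcases List.mem_append.mp he with he | he
        · exact Or.inl ⟨e, he, hw⟩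
        · rw [List.mem_singleton] at he; subst he
          rcases hw with rfl | rfl <;> simp

theorem pvEnds_iff (n : Int) (a b : List Int) (w : Int) :
    w ∈ pvEnds n a b ↔ ∃ e ∈ pvEdges n a b, w = e.1 ∨ w = e.2 := by
  exact pvEnds_fold a b (PySem.List.pyRange 0 n 1) [] [] (by simp) w

-- -------- BFS lemmas --------

theorem pvBfs_append (adj : PySem.Dict Int (List Int)) (U : List Int) :
    ∀ (queue : List Int) (vis : PySem.Set Int),
      (pvBfs adj U queue vis).2 = vis ++ (pvBfs adj U queue vis).1 := by
  intro queue vis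
  fun_induction pvBfs adj U queue vis with
  | case1 vis => simp
  | case2 cur queue vis hv ih => simpa [pvBfs, hv] using ih
  | case3 cur queue vis hv hu vis' extra r ih =>
      have hnm : cur ∉ vis := fun h => hv ((PySem.Set.contains_iff vis cur).mpr h)
      have hv2 : vis' = vis ++ [cur] := PySem.Set.add_of_not_mem hnm
      show r.2 = vis ++ cur :: r.1
      have ih' : r.2 = vis' ++ r.1 := ih
      rw [ih', hv2, List.append_assoc]
      rfl
  | case4 cur queue vis hv hu ih => simpa [pvBfs, hv, hu] using ih

theorem pvBfs_sound (adj : PySem.Dict Int (List Int)) (U : List Int) :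
    ∀ (queue : List Int) (vis : PySem.Set Int) (y : Int),
      y ∈ (pvBfs adj U queue vis).1 →
      ∃ q ∈ queue, Relation.ReflTransGen (pvRA adj) q y := by
  intro queue vis y
  fun_induction pvBfs adj U queue vis with
  | case1 vis => intro hy; cases hy
  | case2 cur queue vis hv ih =>
      intro hy
      obtain ⟨q, hq, hr⟩ := ih hy
      exact ⟨q, List.mem_cons_of_mem _ hq, hr⟩
  | case3 cur queue vis hv hu vis' extra r ih =>
      intro hy
      rcases List.mem_cons.mp hy with rfl | hy'
      · exact ⟨y, List.mem_cons_self .., Relation.ReflTransGen.refl⟩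
      · obtain ⟨q, hq, hr⟩ := ih hy'
        rcases List.mem_append.mp hq with hq | hq
        · exact ⟨q, List.mem_cons_of_mem _ hq, hr⟩
        · have hqa : q ∈ adj.getD cur [] := (List.mem_filter.mp hq).1
          exact ⟨cur, List.mem_cons_self .., Relation.ReflTransGen.head hqa hr⟩
  | case4 cur queue vis hv hu ih =>
      intro hy
      obtain ⟨q, hq, hr⟩ := ih hy
      exact ⟨q, List.mem_cons_of_mem _ hq, hr⟩

theorem pvBfs_closed (adj : PySem.Dict Int (List Int)) (U : List Int)
    (hvals : ∀ v w : Int, w ∈ adj.getD v [] → w ∈ U) :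
    ∀ (queue : List Int) (vis : PySem.Set Int),
      (∀ q ∈ queue, q ∈ U) →
      (∀ v ∈ vis, ∀ w ∈ adj.getD v [], w ∈ vis ∨ w ∈ queue) →
      ∀ v ∈ (pvBfs adj U queue vis).2, ∀ w ∈ adj.getD v [],
        w ∈ (pvBfs adj U queue vis).2 := by
  intro queue vis
  fun_induction pvBfs adj U queue vis with
  | case1 vis =>
      intro hq hInv v hvv w hw
      rcases hInv v hvv w hw with h | h
      · exact h
      · cases h
  | case2 cur queue vis hv ih =>
      intro hq hInv
      apply ih
      · exact fun q hqq => hq q (List.mem_cons_of_mem _ hqq)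
      · intro v hvv w hw
        rcases hInv v hvv w hw with h | h
        · exact Or.inl h
        · rcases List.mem_cons.mp h with rfl | h
          · exact Or.inl ((PySem.Set.contains_iff vis w).mp hv)
          · exact Or.inr h
  | case3 cur queue vis hv hu vis' extra r ih =>
      intro hq hInv
      show ∀ v ∈ r.2, ∀ w ∈ adj.getD v [], w ∈ r.2
      apply ih
      · intro q hqq
        rcases List.mem_append.mp hqq with h | h
        · exact hq q (List.mem_cons_of_mem _ h)
        · exact hvals _ _ (List.mem_filter.mp h).1
      · intro v hvv w hw
        rcases (PySem.Set.mem_add vis cur v).mp hvv with hvv' | rfl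
        · rcases hInv v hvv' w hw with h | h
          · exact Or.inl ((PySem.Set.mem_add _ _ _).mpr (Or.inl h))
          · rcases List.mem_cons.mp h with rfl | h
            · exact Or.inl ((PySem.Set.mem_add _ _ _).mpr (Or.inr rfl))
            · exact Or.inr (List.mem_append.mpr (Or.inl h))
        · by_cases hwv : w ∈ vis'
          · exact Or.inl hwv
          · refine Or.inr (List.mem_append.mpr (Or.inr ?_))
            refine List.mem_filter.mpr ⟨hw, ?_⟩
            cases hcw : PySem.Set.contains vis' w
            · rfl
            · exact absurd ((PySem.Set.contains_iff _ _).mp hcw) hwv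
  | case4 cur queue vis hv hu ih =>
      intro hq hInv
      exact absurd (hq cur (List.mem_cons_self ..)) hu

theorem pvBfs_start (adj : PySem.Dict Int (List Int)) (U : List Int) (x : Int)
    (vis : PySem.Set Int) (hx : PySem.Set.contains vis x = false) (hu : x ∈ U) :
    x ∈ (pvBfs adj U [x] vis).2 := by
  rw [pvBfs_append]
  simp only [pvBfs, hx, hu]
  simp

theorem pvReach_closed (adj : PySem.Dict Int (List Int)) (vis : List Int)
    (hc : ∀ v ∈ vis, ∀ w ∈ adj.getD v [], w ∈ vis) {x y : Int} (hx : x ∈ vis)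
    (h : Relation.ReflTransGen (pvRA adj) x y) : y ∈ vis := by
  induction h with
  | refl => exact hx
  | tail h1 h2 ih => exact hc _ ih _ h2

-- -------- outer x-loop lemmas --------

theorem pvXLoop_false (n : Int) (adj : PySem.Dict Int (List Int)) (ends : List Int) :
    ∀ (xs : List Int) (vis : PySem.Set Int),
      pvXLoop n adj ends xs vis = false →
      ∃ x ∈ xs, ∃ y, Relation.ReflTransGen (pvRA adj) x y ∧ pvInR n y = false := by
  intro xs
  induction xs with
  | nil => intro vis h; simp [pvXLoop] at h
  | cons x xs ih =>
    intro vis h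
    rw [pvXLoop] at h
    by_cases hc : PySem.Set.contains vis x = true
    · rw [if_pos hc] at h
      obtain ⟨x', hx', y, hr, hy⟩ := ih _ h
      exact ⟨x', List.mem_cons_of_mem _ hx', y, hr, hy⟩
    · rw [if_neg hc] at h
      by_cases hs : pvIsSortable (pvBfs adj (x :: ends) [x] vis).1 n = true
      · rw [if_pos hs] at h
        obtain ⟨x', hx', y, hr, hy⟩ := ih _ h
        exact ⟨x', List.mem_cons_of_mem _ hx', y, hr, hy⟩
      · have : ∃ y ∈ (pvBfs adj (x :: ends) [x] vis).1, pvInR n y = false := by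
          unfold pvIsSortable at hs
          simp only [List.all_eq_true, not_forall] at hs
          obtain ⟨y, hy, hny⟩ := hs
          exact ⟨y, (PySem.List.mem_sorted _ _ _ _).mp hy,
            by cases hv : pvInR n y; rfl; exact absurd hv hny⟩
        obtain ⟨y, hy, hny⟩ := this
        obtain ⟨q, hq, hr⟩ := pvBfs_sound adj (x :: ends) [x] vis y hy
        rcases List.mem_cons.mp hq with rfl | hq'
        · exact ⟨q, List.mem_cons_self .., y, hr, hny⟩
        · cases hq'

theorem pvXLoop_true (n : Int) (adj : PySem.Dict Int (List Int)) (ends : List Int)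
    (hvals : ∀ v w : Int, w ∈ adj.getD v [] → w ∈ ends) :
    ∀ (xs : List Int) (vis : PySem.Set Int),
      pvXLoop n adj ends xs vis = true →
      (∀ v ∈ vis, ∀ w ∈ adj.getD v [], w ∈ vis) →
      (∀ y ∈ vis, pvInR n y = true) →
      ∀ x ∈ xs, ∀ y, Relation.ReflTransGen (pvRA adj) x y → pvInR n y = true := by
  intro xs
  induction xs with
  | nil => intro vis _ _ _ x hx; cases hx
  | cons x xs ih =>
    intro vis h hc hr x' hx' y hry
    rw [pvXLoop] at h
    by_cases hcx : PySem.Set.contains vis x = true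
    · rw [if_pos hcx] at h
      rcases List.mem_cons.mp hx' with rfl | hx''
      · exact hr y (pvReach_closed adj vis hc ((PySem.Set.contains_iff _ _).mp hcx) hry)
      · exact ih vis h hc hr x' hx'' y hry
    · rw [if_neg hcx] at h
      by_cases hs : pvIsSortable (pvBfs adj (x :: ends) [x] vis).1 n = true
      · rw [if_pos hs] at h
        have hvals' : ∀ v w : Int, w ∈ adj.getD v [] → w ∈ x :: ends :=
          fun v w hw => List.mem_cons_of_mem _ (hvals v w hw)
        have hq : ∀ q ∈ ([x] : List Int), q ∈ x :: ends := by
          intro q hq; rcases List.mem_cons.mp hq with rfl | hq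
          · exact List.mem_cons_self ..
          · cases hq
        have hInv : ∀ v ∈ vis, ∀ w ∈ adj.getD v [], w ∈ vis ∨ w ∈ ([x] : List Int) :=
          fun v hv w hw => Or.inl (hc v hv w hw)
        have hc' : ∀ v ∈ (pvBfs adj (x :: ends) [x] vis).2, ∀ w ∈ adj.getD v [],
            w ∈ (pvBfs adj (x :: ends) [x] vis).2 :=
          pvBfs_closed adj (x :: ends) hvals' [x] vis hq hInv
        have hr' : ∀ z ∈ (pvBfs adj (x :: ends) [x] vis).2, pvInR n z = true := by
          intro z hz
          rw [pvBfs_append] at hz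
          rcases List.mem_append.mp hz with hz | hz
          · exact hr z hz
          · unfold pvIsSortable at hs
            rw [List.all_eq_true] at hs
            exact hs z ((PySem.List.mem_sorted _ _ _ _).mpr hz)
        rcases List.mem_cons.mp hx' with rfl | hx''
        · have hxin : x' ∈ (pvBfs adj (x' :: ends) [x'] vis).2 :=
            pvBfs_start adj (x' :: ends) x' vis (by cases hv : PySem.Set.contains vis x'; rfl; exact absurd hv hcx) (List.mem_cons_self ..)
          exact hr' y (pvReach_closed adj _ hc' hxin hry)
        · exact ih _ h hc' hr' x' hx'' y hry
      · rw [if_neg hs] at h; cases h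

theorem pvCaseA_no (c : Int × List Int × List Int)
    (hb : pvBad c.1 (pvEdges c.1 c.2.1 c.2.2)) : pvCaseA c = "NO" := by
  obtain ⟨x, y, hx, hr, hy⟩ := hb
  have hloop : pvXLoop c.1 (pvAdj c.1 c.2.1 c.2.2) (pvEnds c.1 c.2.1 c.2.2)
      (PySem.List.pyRange 1 (2 * c.1 + 1) 1) PySem.Set.empty = false := by
    cases hl : pvXLoop c.1 (pvAdj c.1 c.2.1 c.2.2) (pvEnds c.1 c.2.1 c.2.2)
        (PySem.List.pyRange 1 (2 * c.1 + 1) 1) PySem.Set.empty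
    · rfl
    · exfalso
      have hvals : ∀ v w : Int, w ∈ (pvAdj c.1 c.2.1 c.2.2).getD v [] → w ∈ pvEnds c.1 c.2.1 c.2.2 := by
        intro v w hw
        rcases (pvAdj_getD c.1 c.2.1 c.2.2 v w).mp hw with h | h
        · exact (pvEnds_iff c.1 c.2.1 c.2.2 w).mpr ⟨(v, w), h, Or.inr rfl⟩
        · exact (pvEnds_iff c.1 c.2.1 c.2.2 w).mpr ⟨(w, v), h, Or.inl rfl⟩
      have hx' : x ∈ PySem.List.pyRange 1 (2 * c.1 + 1) 1 := by
        rw [PySem.List.mem_pyRange_one]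
        simp only [pvInR, decide_eq_true_eq] at hx
        omega
      have hry : Relation.ReflTransGen (pvRA (pvAdj c.1 c.2.1 c.2.2)) x y :=
        Relation.ReflTransGen.mono (fun a b h => (pvAdj_getD c.1 c.2.1 c.2.2 a b).mpr h) hr
      have := pvXLoop_true c.1 (pvAdj c.1 c.2.1 c.2.2) (pvEnds c.1 c.2.1 c.2.2) hvals
        (PySem.List.pyRange 1 (2 * c.1 + 1) 1) PySem.Set.empty hl
        (by intro v hv; cases hv) (by intro z hz; cases hz) x hx' y hry
      rw [this] at hy; cases hy
  show (if pvXLoop c.1 (pvAdj c.1 c.2.1 c.2.2) (pvEnds c.1 c.2.1 c.2.2)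
      (PySem.List.pyRange 1 (2 * c.1 + 1) 1) PySem.Set.empty then "YES" else "NO") = "NO"
  rw [hloop]
  rfl

theorem pvCaseA_yes (c : Int × List Int × List Int)
    (hb : ¬ pvBad c.1 (pvEdges c.1 c.2.1 c.2.2)) : pvCaseA c = "YES" := by
  have hloop : pvXLoop c.1 (pvAdj c.1 c.2.1 c.2.2) (pvEnds c.1 c.2.1 c.2.2)
      (PySem.List.pyRange 1 (2 * c.1 + 1) 1) PySem.Set.empty = true := by
    cases hl : pvXLoop c.1 (pvAdj c.1 c.2.1 c.2.2) (pvEnds c.1 c.2.1 c.2.2)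
        (PySem.List.pyRange 1 (2 * c.1 + 1) 1) PySem.Set.empty
    · exfalso
      obtain ⟨x, hx, y, hr, hy⟩ := pvXLoop_false c.1 (pvAdj c.1 c.2.1 c.2.2)
        (pvEnds c.1 c.2.1 c.2.2) (PySem.List.pyRange 1 (2 * c.1 + 1) 1) PySem.Set.empty hl
      refine hb ⟨x, y, ?_, ?_, hy⟩
      · rw [PySem.List.mem_pyRange_one] at hx
        simp only [pvInR, decide_eq_true_eq]
        omega
      · exact Relation.ReflTransGen.mono (fun a b h => (pvAdj_getD c.1 c.2.1 c.2.2 a b).mp h) hr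
    · rfl
  show (if pvXLoop c.1 (pvAdj c.1 c.2.1 c.2.2) (pvEnds c.1 c.2.1 c.2.2)
      (PySem.List.pyRange 1 (2 * c.1 + 1) 1) PySem.Set.empty then "YES" else "NO") = "YES"
  rw [hloop]
  rfl

-- -------- B-side lemmas --------

theorem pvFoldl_superset {α : Type} (f : List Int → α → List Int)
    (hf : ∀ s e (y : Int), y ∈ s → y ∈ f s e) :
    ∀ (l : List α) (s : List Int) (y : Int), y ∈ s → y ∈ l.foldl f s := by
  intro l
  induction l with
  | nil => intro s y hy; simpa using hy
  | cons e l ih => intro s y hy; exact ih _ _ (hf s e y hy)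

theorem pvPass_superset (l : List (Int × Int)) (s : PySem.Set Int) (y : Int)
    (hy : y ∈ s) : y ∈ pvPass l s := by
  refine pvFoldl_superset _ ?_ l s y hy
  intro s e y hy
  split
  · exact (PySem.Set.mem_add _ _ _).mpr (Or.inl ((PySem.Set.mem_add _ _ _).mpr (Or.inl hy)))
  · exact hy

theorem pvPass_cons (e : Int × Int) (l : List (Int × Int)) (s : PySem.Set Int) :
    pvPass (e :: l) s = pvPass l
      (if PySem.Set.contains s e.1 || PySem.Set.contains s e.2 then
        PySem.Set.add (PySem.Set.add s e.1) e.2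
      else s) := rfl

theorem pvAdd_prefix (s : PySem.Set Int) (x : Int) : s <+: PySem.Set.add s x := by
  rw [PySem.Set.add_eq_ite]
  split
  · exact List.prefix_refl _
  · exact List.prefix_append _ _

theorem pvPass_edge (l : List (Int × Int)) (s : PySem.Set Int) (e : Int × Int)
    (he : e ∈ l) (hs : e.1 ∈ s ∨ e.2 ∈ s) :
    e.1 ∈ pvPass l s ∧ e.2 ∈ pvPass l s := by
  induction l generalizing s with
  | nil => cases he
  | cons e' l ih =>
    rw [pvPass_cons]
    rcases List.mem_cons.mp he with rfl | he'
    · have hcond : (PySem.Set.contains s e.1 || PySem.Set.contains s e.2) = true := by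
        simp only [Bool.or_eq_true, PySem.Set.contains_iff]
        exact hs
      rw [if_pos hcond]
      constructor <;> apply pvPass_superset
      · exact (PySem.Set.mem_add _ _ _).mpr (Or.inl ((PySem.Set.mem_add _ _ _).mpr (Or.inr rfl)))
      · exact (PySem.Set.mem_add _ _ _).mpr (Or.inr rfl)
    · by_cases hcond : (PySem.Set.contains s e'.1 || PySem.Set.contains s e'.2) = true
      · rw [if_pos hcond]
        refine ih _ he' ?_
        rcases hs with h | h
        · exact Or.inl ((PySem.Set.mem_add _ _ _).mpr (Or.inl ((PySem.Set.mem_add _ _ _).mpr (Or.inl h))))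
        · exact Or.inr ((PySem.Set.mem_add _ _ _).mpr (Or.inl ((PySem.Set.mem_add _ _ _).mpr (Or.inl h))))
      · rw [if_neg hcond]
        exact ih _ he' hs

theorem pvPass_mem (l : List (Int × Int)) (s : PySem.Set Int) (y : Int)
    (hy : y ∈ pvPass l s) : y ∈ s ∨ ∃ e ∈ l, y = e.1 ∨ y = e.2 := by
  induction l generalizing s with
  | nil => exact Or.inl hy
  | cons e l ih =>
    rw [pvPass_cons] at hy
    rcases ih _ hy with h | h
    · split at h
      · rcases (PySem.Set.mem_add _ _ _).mp h with h' | rfl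
        · rcases (PySem.Set.mem_add _ _ _).mp h' with h'' | rfl
          · exact Or.inl h''
          · exact Or.inr ⟨e, List.mem_cons_self .., Or.inl rfl⟩
        · exact Or.inr ⟨e, List.mem_cons_self .., Or.inr rfl⟩
      · exact Or.inl h
    · obtain ⟨e', he', hy'⟩ := h
      exact Or.inr ⟨e', List.mem_cons_of_mem _ he', hy'⟩

theorem pvPass_prefix (l : List (Int × Int)) (s : PySem.Set Int) :
    s <+: pvPass l s := by
  induction l generalizing s with
  | nil => exact List.prefix_refl _
  | cons e l ih =>
    rw [pvPass_cons]
    refine List.IsPrefix.trans ?_ (ih _)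
    split
    · exact (pvAdd_prefix s e.1).trans (pvAdd_prefix _ e.2)
    · exact List.prefix_refl _

theorem pvPass_nodup (l : List (Int × Int)) (s : PySem.Set Int) (h : s.Nodup) :
    (pvPass l s).Nodup := by
  induction l generalizing s with
  | nil => exact h
  | cons e l ih =>
    rw [pvPass_cons]
    apply ih
    split
    · exact PySem.Set.nodup_add _ _ (PySem.Set.nodup_add _ _ h)
    · exact h

theorem pvPass_sound (E : List (Int × Int)) (n : Int) :
    ∀ (l : List (Int × Int)) (s : PySem.Set Int), (∀ e ∈ l, e ∈ E) →
      (∀ y ∈ s, ∃ x, pvInR n x = true ∧ pvReach E x y) →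
      ∀ y ∈ pvPass l s, ∃ x, pvInR n x = true ∧ pvReach E x y := by
  intro l
  induction l with
  | nil => intro s _ hmem y hy; exact hmem y hy
  | cons e l ih =>
    intro s hl hmem y hy
    rw [pvPass_cons] at hy
    refine ih _ (fun e' he' => hl e' (List.mem_cons_of_mem _ he')) ?_ y hy
    intro z hz
    by_cases hcond : (PySem.Set.contains s e.1 || PySem.Set.contains s e.2) = true
    · rw [if_pos hcond] at hz
      have he : e ∈ E := hl e (List.mem_cons_self ..)
      have hc' : e.1 ∈ s ∨ e.2 ∈ s := by
        simp only [Bool.or_eq_true, PySem.Set.contains_iff] at hcond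
        exact hcond
      rcases (PySem.Set.mem_add _ _ _).mp hz with hz' | rfl
      · rcases (PySem.Set.mem_add _ _ _).mp hz' with hz'' | rfl
        · exact hmem z hz''
        · rcases hc' with h | h
          · exact hmem _ h
          · obtain ⟨x, hx, hrx⟩ := hmem _ h
            exact ⟨x, hx, Relation.ReflTransGen.tail hrx (Or.inr he)⟩
      · rcases hc' with h | h
        · obtain ⟨x, hx, hrx⟩ := hmem _ h
          exact ⟨x, hx, Relation.ReflTransGen.tail hrx (Or.inl he)⟩
        · exact hmem _ h
    · rw [if_neg hcond] at hz
      exact hmem z hz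

theorem pvSat_superset (E : List (Int × Int)) :
    ∀ (m : Nat) (s : PySem.Set Int) (y : Int), y ∈ s → y ∈ pvSat E m s := by
  intro m
  induction m with
  | zero => intro s y hy; exact hy
  | succ m ih =>
    intro s y hy
    show y ∈ (if (pvPass E s).length = s.length then pvPass E s else pvSat E m (pvPass E s))
    split
    · exact pvPass_superset E s y hy
    · exact ih _ _ (pvPass_superset E s y hy)

theorem pvFlat_length (E : List (Int × Int)) :
    (E.flatMap (fun e => [e.1, e.2])).length = 2 * E.length := by
  induction E with
  | nil => rfl
  | cons e E ih => simp only [List.flatMap_cons, List.length_append, List.length_cons, ih]; simp; omega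

theorem pvNodup_length_le (s t : List Int) (hs : s.Nodup) (hsub : ∀ y ∈ s, y ∈ t) :
    s.length ≤ t.length := by
  have h1 : s.toFinset.card = s.length := List.toFinset_card_of_nodup hs
  have h2 : s.toFinset ⊆ t.toFinset := by
    intro y hy; simp only [List.mem_toFinset] at *; exact hsub y hy
  have h3 := Finset.card_le_card h2
  have h4 := t.toFinset_card_le
  omega

theorem pvSat_fix (E : List (Int × Int)) :
    ∀ (m : Nat) (s : PySem.Set Int), s.Nodup →
      (∀ y ∈ s, ∃ e ∈ E, y = e.1 ∨ y = e.2) →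
      2 * E.length ≤ s.length + m →
      pvPass E (pvSat E m s) = pvSat E m s := by
  intro m
  induction m with
  | zero =>
    intro s hnd hmem hlen
    show pvPass E s = s
    have hpre := pvPass_prefix E s
    have hsub : ∀ y ∈ pvPass E s, y ∈ E.flatMap (fun e => [e.1, e.2]) := by
      intro y hy
      rcases pvPass_mem E s y hy with h | h
      · obtain ⟨e, he, h'⟩ := hmem y h
        rcases h' with rfl | rfl <;> exact List.mem_flatMap.mpr ⟨e, he, by simp⟩
      · obtain ⟨e, he, h'⟩ := h
        rcases h' with rfl | rfl <;> exact List.mem_flatMap.mpr ⟨e, he, by simp⟩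
    have h1 : (pvPass E s).length ≤ 2 * E.length := by
      have := pvNodup_length_le _ _ (pvPass_nodup E s hnd) hsub
      rw [pvFlat_length] at this
      exact this
    have h2 : s.length ≤ (pvPass E s).length := hpre.length_le
    exact (hpre.eq_of_length (by omega)).symm
  | succ m ih =>
    intro s hnd hmem hlen
    show pvPass E (if (pvPass E s).length = s.length then pvPass E s else pvSat E m (pvPass E s)) =
      (if (pvPass E s).length = s.length then pvPass E s else pvSat E m (pvPass E s))
    split
    · rename_i hlen'
      have h1 : pvPass E s = s := (pvPass_prefix E s).eq_of_length hlen'.symm |>.symm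
      rw [h1]
      exact h1
    · rename_i hlen'
      have hle : s.length ≤ (pvPass E s).length := (pvPass_prefix E s).length_le
      have hlt : s.length < (pvPass E s).length := by omega
      refine ih (pvPass E s) (pvPass_nodup E s hnd) ?_ (by omega)
      intro y hy
      rcases pvPass_mem E s y hy with h | h
      · exact hmem y h
      · exact h

theorem pvSat_sound (E : List (Int × Int)) (n : Int) :
    ∀ (m : Nat) (s : PySem.Set Int),
      (∀ y ∈ s, ∃ x, pvInR n x = true ∧ pvReach E x y) →
      ∀ y ∈ pvSat E m s, ∃ x, pvInR n x = true ∧ pvReach E x y := by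
  intro m
  induction m with
  | zero => intro s hs; exact hs
  | succ m ih =>
    intro s hs
    intro y hy
    have hs' := pvPass_sound E n E s (fun e he => he) hs
    revert hy
    show y ∈ (if (pvPass E s).length = s.length then pvPass E s else pvSat E m (pvPass E s)) → _
    split
    · exact fun hy => hs' y hy
    · exact fun hy => ih _ hs' y hy

theorem pvInitAux_mem (n : Int) : ∀ (l : List (Int × Int)) (s : PySem.Set Int) (y : Int),
    y ∈ l.foldl (fun s e =>
      let s1 := if pvInR n e.1 then PySem.Set.add s e.1 else s
      if pvInR n e.2 then PySem.Set.add s1 e.2 else s1) s →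
    y ∈ s ∨ (pvInR n y = true ∧ ∃ e ∈ l, y = e.1 ∨ y = e.2) := by
  intro l
  induction l with
  | nil => intro s y hy; exact Or.inl hy
  | cons e l ih =>
    intro s y hy
    rw [List.foldl_cons] at hy
    rcases ih _ y hy with h | ⟨hin, e', he', hy'⟩
    · dsimp only at h
      by_cases h2 : pvInR n e.2 = true
      · rw [if_pos h2] at h
        rcases (PySem.Set.mem_add _ _ _).mp h with h | rfl
        · by_cases h1 : pvInR n e.1 = true
          · rw [if_pos h1] at h
            rcases (PySem.Set.mem_add _ _ _).mp h with h | rfl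
            · exact Or.inl h
            · exact Or.inr ⟨h1, e, List.mem_cons_self .., Or.inl rfl⟩
          · rw [if_neg h1] at h; exact Or.inl h
        · exact Or.inr ⟨h2, e, List.mem_cons_self .., Or.inr rfl⟩
      · rw [if_neg h2] at h
        by_cases h1 : pvInR n e.1 = true
        · rw [if_pos h1] at h
          rcases (PySem.Set.mem_add _ _ _).mp h with h | rfl
          · exact Or.inl h
          · exact Or.inr ⟨h1, e, List.mem_cons_self .., Or.inl rfl⟩
        · rw [if_neg h1] at h; exact Or.inl h
    · exact Or.inr ⟨hin, e', List.mem_cons_of_mem _ he', hy'⟩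

theorem pvInit_mem (n : Int) (E : List (Int × Int)) (y : Int) (hy : y ∈ pvInit n E) :
    pvInR n y = true ∧ ∃ e ∈ E, y = e.1 ∨ y = e.2 := by
  rcases pvInitAux_mem n E PySem.Set.empty y hy with h | h
  · cases h
  · exact h

theorem pvInitStep_superset (n : Int) (s : PySem.Set Int) (e : Int × Int) (y : Int)
    (hy : y ∈ s) :
    y ∈ (let s1 := if pvInR n e.1 then PySem.Set.add s e.1 else s
         if pvInR n e.2 then PySem.Set.add s1 e.2 else s1) := by
  dsimp only
  split
  · refine (PySem.Set.mem_add _ _ _).mpr (Or.inl ?_)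
    split
    · exact (PySem.Set.mem_add _ _ _).mpr (Or.inl hy)
    · exact hy
  · split
    · exact (PySem.Set.mem_add _ _ _).mpr (Or.inl hy)
    · exact hy

theorem pvInit_nodup (n : Int) (E : List (Int × Int)) : (pvInit n E).Nodup := by
  suffices h : ∀ (l : List (Int × Int)) (s : PySem.Set Int), s.Nodup →
      (l.foldl (fun s e =>
        let s1 := if pvInR n e.1 then PySem.Set.add s e.1 else s
        if pvInR n e.2 then PySem.Set.add s1 e.2 else s1) s).Nodup by
    exact h E PySem.Set.empty List.nodup_nil
  intro l
  induction l with
  | nil => intro s hs; exact hs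
  | cons e l ih =>
    intro s hs
    rw [List.foldl_cons]
    apply ih
    dsimp only
    split
    · apply PySem.Set.nodup_add
      split
      · exact PySem.Set.nodup_add _ _ hs
      · exact hs
    · split
      · exact PySem.Set.nodup_add _ _ hs
      · exact hs

theorem pvInit_complete (n : Int) (E : List (Int × Int)) (e : Int × Int) (he : e ∈ E) :
    (pvInR n e.1 = true → e.1 ∈ pvInit n E) ∧ (pvInR n e.2 = true → e.2 ∈ pvInit n E) := by
  suffices h : ∀ (l : List (Int × Int)) (s : PySem.Set Int) (e : Int × Int), e ∈ l →
      (pvInR n e.1 = true → e.1 ∈ l.foldl (fun s e =>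
        let s1 := if pvInR n e.1 then PySem.Set.add s e.1 else s
        if pvInR n e.2 then PySem.Set.add s1 e.2 else s1) s) ∧
      (pvInR n e.2 = true → e.2 ∈ l.foldl (fun s e =>
        let s1 := if pvInR n e.1 then PySem.Set.add s e.1 else s
        if pvInR n e.2 then PySem.Set.add s1 e.2 else s1) s) by
    exact h E PySem.Set.empty e he
  intro l
  induction l with
  | nil => intro s e he; cases he
  | cons e' l ih =>
    intro s e he
    rw [List.foldl_cons]
    rcases List.mem_cons.mp he with rfl | he'
    · constructor
      · intro h1
        refine pvFoldl_superset _ (fun s e y hy => pvInitStep_superset n s e y hy) l _ _ ?_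
        dsimp only
        rw [if_pos h1]
        split
        · exact (PySem.Set.mem_add _ _ _).mpr (Or.inl ((PySem.Set.mem_add _ _ _).mpr (Or.inr rfl)))
        · exact (PySem.Set.mem_add _ _ _).mpr (Or.inr rfl)
      · intro h2
        refine pvFoldl_superset _ (fun s e y hy => pvInitStep_superset n s e y hy) l _ _ ?_
        dsimp only
        rw [if_pos h2]
        exact (PySem.Set.mem_add _ _ _).mpr (Or.inr rfl)
    · exact ih _ e he'

theorem pvFix_reach (E : List (Int × Int)) (F : PySem.Set Int)
    (hfix : pvPass E F = F) {x y : Int} (hx : x ∈ F) (h : pvReach E x y) : y ∈ F := by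
  induction h with
  | refl => exact hx
  | tail h1 h2 ih =>
    rcases h2 with h2 | h2
    · have := pvPass_edge E F _ h2 (Or.inl ih)
      rw [hfix] at this
      exact this.2
    · have := pvPass_edge E F _ h2 (Or.inr ih)
      rw [hfix] at this
      exact this.1

theorem pvCaseB_no (c : Int × List Int × List Int)
    (hb : pvBad c.1 (pvEdges c.1 c.2.1 c.2.2)) : pvCaseB c = "NO" := by
  obtain ⟨x, y, hx, hr, hy⟩ := hb
  show (if (pvSat (pvEdges c.1 c.2.1 c.2.2) (2 * (pvEdges c.1 c.2.1 c.2.2).length)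
      (pvInit c.1 (pvEdges c.1 c.2.1 c.2.2))).all (fun x => pvInR c.1 x) then "YES" else "NO") = "NO"
  set E := pvEdges c.1 c.2.1 c.2.2 with hE
  set F := pvSat E (2 * E.length) (pvInit c.1 E) with hF
  have hfix : pvPass E F = F := by
    rw [hF]
    exact pvSat_fix E (2 * E.length) (pvInit c.1 E) (pvInit_nodup c.1 E)
      (fun z hz => (pvInit_mem c.1 E z hz).2) (by omega)
  have hyF : y ∈ F := by
    rcases Relation.ReflTransGen.cases_head hr with rfl | ⟨z, hxz, hzy⟩
    · rw [hx] at hy; cases hy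
    · have hxinit : x ∈ pvInit c.1 E := by
        rcases hxz with h | h
        · exact (pvInit_complete c.1 E _ h).1 hx
        · exact (pvInit_complete c.1 E _ h).2 hx
      have hxF : x ∈ F := pvSat_superset E (2 * E.length) _ x hxinit
      exact pvFix_reach E F hfix hxF hr
  have hall : F.all (fun z => pvInR c.1 z) = false := by
    cases hA : F.all (fun z => pvInR c.1 z)
    · rfl
    · rw [List.all_eq_true] at hA
      have := hA y hyF
      rw [hy] at this
      cases this
  rw [hall]
  rfl

theorem pvCaseB_yes (c : Int × List Int × List Int)
    (hb : ¬ pvBad c.1 (pvEdges c.1 c.2.1 c.2.2)) : pvCaseB c = "YES" := by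
  show (if (pvSat (pvEdges c.1 c.2.1 c.2.2) (2 * (pvEdges c.1 c.2.1 c.2.2).length)
      (pvInit c.1 (pvEdges c.1 c.2.1 c.2.2))).all (fun x => pvInR c.1 x) then "YES" else "NO") = "YES"
  set E := pvEdges c.1 c.2.1 c.2.2 with hE
  set F := pvSat E (2 * E.length) (pvInit c.1 E) with hF
  have hsound : ∀ z ∈ F, ∃ x, pvInR c.1 x = true ∧ pvReach E x z := by
    rw [hF]
    exact pvSat_sound E c.1 (2 * E.length) (pvInit c.1 E)
      (fun z hz => ⟨z, (pvInit_mem c.1 E z hz).1, Relation.ReflTransGen.refl⟩)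
  have hall : F.all (fun z => pvInR c.1 z) = true := by
    rw [List.all_eq_true]
    intro z hz
    obtain ⟨x, hx, hr⟩ := hsound z hz
    cases hvz : pvInR c.1 z
    · exact absurd ⟨x, z, hx, hr, hvz⟩ hb
    · rfl
  rw [hall]
  rfl

-- -------- glue --------

theorem pvCase_eq (c : Int × List Int × List Int) : pvCaseA c = pvCaseB c := by
  by_cases hb : pvBad c.1 (pvEdges c.1 c.2.1 c.2.2)
  · rw [pvCaseA_no c hb, pvCaseB_no c hb]
  · rw [pvCaseA_yes c hb, pvCaseB_yes c hb]

-- ===== VERDICT (by name: the statement is the Claim_ definition above) =====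
theorem bugged_sort_spec : Claim_equal_bugged_sort := by
  intro t test_cases _ _
  unfold Spec_bugged_sort bugged_sort bugged_sort_alt
  have : pvCaseA = pvCaseB := funext pvCase_eq
  rw [this]
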